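-- pv_equiv track=rewrite | github.com/Tridagger/Poker-414 | core/poker.py | is_pair_chain
-- ===== SOURCE A (Python) =====
-- def calc_card_level(card):
--     assert isinstance(card, tuple)
--     card_dict = {
--         'J': 11,
--         'Q': 12,
--         'K': 13,
--         'A': 14,
--         '2': 16,
--         'red': 18,
--         'black': 19
--     }
--     if str(card[0]) in card_dict:
--         return card_dict[str(card[0])]
--     else:
--         return int(card[0])
--
-- def is_pair_chain(cards):
--     assert isinstance(cards, list)
--     cl = sorted([calc_card_level(card) for card in cards])
--     cs = sorted(list(set(cl)))  # 去重后的列表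
--     if len(cl) > 5 and len(cl) == len(cs) * 2:
--         for i in range(int(len(cl) / 2)):
--             if cl[i * 2] != cl[i * 2 + 1]:
--                 return False
--         if len(cs) == (cs[-1] - cs[0] + 1):
--             return True
--         else:
--             return False
--     else:
--         return False
-- ===== SOURCE B (Python) =====
-- def calc_card_level(card):
--     assert isinstance(card, tuple)
--     card_dict = {
--         'J': 11,
--         'Q': 12,
--         'K': 13,
--         'A': 14,
--         '2': 16,
--         'red': 18,
--         'black': 19
--     }
--     if str(card[0]) in card_dict:
--         return card_dict[str(card[0])]
--     else:
--         return int(card[0])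
--
-- def is_pair_chain(cards):
--     assert isinstance(cards, list)
--     if len(cards) <= 5:
--         return False
--     counts = {}
--     for card in cards:
--         lv = calc_card_level(card)
--         counts[lv] = counts.get(lv, 0) + 1
--     if any(c != 2 for c in counts.values()):
--         return False
--     return max(counts) - min(counts) + 1 == len(counts)
-- ===== Notes on version B (the rewrite author's own statement) =====
-- stated objective: idiomatic
-- what changed: Replaces the double sort plus indexed pair loop with a single-pass counting dict: True iff more than 5 cards, every level's count is exactly 2, and max(level)-min(level)+1 equals the number of distinct levels.
import Mathlib
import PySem

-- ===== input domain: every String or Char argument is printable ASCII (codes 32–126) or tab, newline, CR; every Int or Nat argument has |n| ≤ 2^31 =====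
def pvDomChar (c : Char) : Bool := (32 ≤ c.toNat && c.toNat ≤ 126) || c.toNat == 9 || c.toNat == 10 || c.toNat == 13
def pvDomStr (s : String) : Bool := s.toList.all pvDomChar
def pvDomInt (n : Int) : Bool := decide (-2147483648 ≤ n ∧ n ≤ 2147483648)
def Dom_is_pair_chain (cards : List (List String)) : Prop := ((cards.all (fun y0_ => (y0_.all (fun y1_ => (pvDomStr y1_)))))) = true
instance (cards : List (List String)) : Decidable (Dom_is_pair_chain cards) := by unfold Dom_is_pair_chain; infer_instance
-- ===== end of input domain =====

-- B replaces A's double sort and indexed pair loop by a one-pass counting dict (idiomatic Counter style);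
-- equivalence is about the return value only (neither version mutates its argument).

-- ===== PORT A =====
-- helper calc_card_level: `none` exactly where the Python raises (IndexError on card[0], ValueError in int())
def card_dict : PySem.Dict String Int :=
  PySem.Dict.ofList [("J", 11), ("Q", 12), ("K", 13), ("A", 14), ("2", 16), ("red", 18), ("black", 19)]

def calc_card_level (card : List String) : Option Int :=
  match PySem.List.pyGet? card 0 with          -- card[0] (str(card[0]) is the identity: elements are strings)
  | none => none
  | some c0 =>
    if card_dict.contains c0 then card_dict.get? c0
    else PySem.Int.ofStr? c0                   -- int(card[0])

def is_pair_chain (cards : List (List String)) : Bool :=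
  match cards.mapM calc_card_level with        -- [calc_card_level(card) for card in cards]
  | none => false                              -- unreachable under Pre_
  | some lvls =>
    let cl := PySem.List.sorted lvls (fun x => x) false
    let cs := PySem.List.sorted (PySem.Set.ofList cl) (fun x => x) false
    if 5 < (cl.length : Int) ∧ (cl.length : Int) = (cs.length : Int) * 2 then
      -- int(len(cl)/2) = len(cl) // 2 for a nonnegative length
      if (PySem.List.pyRange 0 (PySem.Int.floordiv (cl.length : Int) 2) 1).all
          (fun i => PySem.List.pyGetD cl (i * 2) 0 == PySem.List.pyGetD cl (i * 2 + 1) 0) then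
        if (cs.length : Int) = PySem.List.pyGetD cs (-1) 0 - PySem.List.pyGetD cs 0 0 + 1 then true
        else false
      else false
    else false

-- ===== PORT B =====
def is_pair_chain_alt (cards : List (List String)) : Bool :=
  if (cards.length : Int) ≤ 5 then false
  else
    match cards.mapM calc_card_level with      -- the loop body's calc_card_level(card); none = unreachable under Pre_
    | none => false
    | some lvls =>
      let counts := lvls.foldl (fun d lv => d.insert lv (d.getD lv 0 + 1)) (PySem.Dict.empty : PySem.Dict Int Int)
      if counts.values.any (fun c => c != 2) then false
      else
        match PySem.List.max? counts.keys (fun x => x), PySem.List.min? counts.keys (fun x => x) with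
        | some mx, some mn => decide (mx - mn + 1 = (counts.size : Int))
        | _, _ => false                        -- unreachable: counts is nonempty when len(cards) > 5

-- ===== PRECONDITION & SPEC =====
-- Pre_ excludes exactly the inputs where A raises: a card with no first element (IndexError)
-- or a first element that is neither a face key nor an int literal (ValueError in int()).
def pvValidCard (card : List String) : Bool :=
  match card with
  | [] => false
  | c0 :: _ =>
    c0 == "J" || c0 == "Q" || c0 == "K" || c0 == "A" || c0 == "2" || c0 == "red" || c0 == "black"
      || (PySem.Int.ofStr? c0).isSome

def Pre_is_pair_chain (cards : List (List String)) : Prop := cards.all pvValidCard = true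
instance (cards : List (List String)) : Decidable (Pre_is_pair_chain cards) := by
  unfold Pre_is_pair_chain; infer_instance

def pvWitness_is_pair_chain : List (List String) := [["3"], ["3"], ["4"], ["4"], ["5"], ["5"]]

def Spec_is_pair_chain (cards : List (List String)) (out : Bool) : Prop := out = is_pair_chain_alt cards
instance (cards : List (List String)) (out : Bool) : Decidable (Spec_is_pair_chain cards out) := by
  unfold Spec_is_pair_chain; infer_instance

-- ===== CLAIM (what is proved, stated in full; the proofs are below) =====
def Claim_equal_is_pair_chain : Prop := ∀ (cards : List (List String)), Dom_is_pair_chain cards → Pre_is_pair_chain cards → Spec_is_pair_chain cards (is_pair_chain cards)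

-- ===== LEMMAS AND PROOFS =====

lemma calc_isSome (card : List String) (h : pvValidCard card = true) :
    (calc_card_level card).isSome := by
  match card with
  | [] => simp [pvValidCard] at h
  | c0 :: rest =>
    simp only [pvValidCard, Bool.or_eq_true, beq_iff_eq] at h
    have hget : PySem.List.pyGet? (c0 :: rest) (0 : Int) = some c0 := by
      simp [PySem.List.pyGet?, PySem.List.pyIdx?]
    simp only [calc_card_level, hget]
    rcases h with ((((((h|h)|h)|h)|h)|h)|h) | h
    all_goals first
      | (subst h; decide)
      | (split
         · rename_i hc
           simp only [PySem.Dict.get?, Option.isSome_map]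
           simp only [PySem.Dict.contains, List.any_eq_true] at hc
           rcases hc with ⟨p, hp, hpk⟩
           exact List.find?_isSome.mpr ⟨p, hp, hpk⟩
         · simpa using h)


lemma mapM_levels (cards : List (List String)) (h : cards.all pvValidCard = true) :
    ∃ lvls : List Int, cards.mapM calc_card_level = some lvls ∧ lvls.length = cards.length := by
  induction cards with
  | nil => exact ⟨[], rfl, rfl⟩
  | cons c t ih =>
    simp only [List.all_cons, Bool.and_eq_true] at h
    rcases ih h.2 with ⟨lv, hlv, hlen⟩
    rcases Option.isSome_iff_exists.mp (calc_isSome c h.1) with ⟨v, hv⟩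
    exact ⟨v :: lv, by simp [List.mapM_cons, hv, hlv], by simp [hlen]⟩

def allTwo (lvls : List Int) : Prop := ∀ x ∈ lvls, lvls.count x = 2

lemma count_flat_pair (ps : List Int) (x : Int) :
    (ps.flatMap (fun x => [x, x])).count x = 2 * ps.count x := by
  induction ps with
  | nil => simp
  | cons a t ih => simp [List.count_cons, ih]; split <;> omega

lemma mem_flat_pair (ps : List Int) (x : Int) :
    x ∈ ps.flatMap (fun x => [x, x]) ↔ x ∈ ps := by
  simp [List.mem_flatMap]

lemma sublist_flat_pair (ps : List Int) : ps.Sublist (ps.flatMap (fun x => [x, x])) := by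
  induction ps with
  | nil => simp
  | cons a t ih =>
    simpa using List.Sublist.cons₂ a (List.Sublist.cons a ih)

lemma pairwise_le_flat_pair (ps : List Int) (h : ps.Pairwise (· < ·)) :
    (ps.flatMap (fun x => [x, x])).Pairwise (· ≤ ·) := by
  induction ps with
  | nil => simp
  | cons a t ih =>
    rcases List.pairwise_cons.mp h with ⟨ha, ht⟩
    simp only [List.flatMap_cons]
    rw [List.pairwise_append]
    refine ⟨by simp, ih ht, ?_⟩
    intro x hx y hy
    simp at hx
    rcases List.mem_flatMap.mp hy with ⟨c, hc, hyc⟩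
    simp at hyc
    subst hx; subst hyc
    exact le_of_lt (ha _ hc)

lemma nodup_of_toFinset_card (l : List Int) (h : l.toFinset.card = l.length) : l.Nodup := by
  rw [List.card_toFinset] at h
  exact List.dedup_eq_self.mp ((List.dedup_sublist l).eq_of_length h)

-- cl = sorted lvls, cs = sorted (set cl): flat-pair shape ↔ every count is 2
lemma flat_iff_allTwo (lvls : List Int) :
    (PySem.List.sorted lvls (fun x => x) false =
      (PySem.List.sorted (PySem.Set.ofList (PySem.List.sorted lvls (fun x => x) false)) (fun x => x) false).flatMap
        (fun x => [x, x]))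
    ↔ allTwo lvls := by
  set cl := PySem.List.sorted lvls (fun x => x) false with hcl
  set cs := PySem.List.sorted (PySem.Set.ofList cl) (fun x => x) false with hcs
  have hclp : cl.Perm lvls := PySem.List.sorted_perm lvls (fun x => x) false
  have hcslt : cs.Pairwise (· < ·) := PySem.List.sorted_ofList_pairwise_lt cl
  have hcsnd : cs.Nodup := hcslt.imp (fun h => ne_of_lt h)
  have hcsm : ∀ x, x ∈ cs ↔ x ∈ lvls := by
    intro x
    rw [hcs, PySem.List.mem_sorted, PySem.Set.mem_ofList]
    exact hclp.mem_iff
  constructor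
  · intro hflat x hx
    have h1 : lvls.count x = cl.count x := (hclp.count_eq x).symm
    rw [h1, hflat, count_flat_pair, List.count_eq_one_of_mem hcsnd ((hcsm x).mpr hx)]
  · intro hAll
    have hperm : ((cs.flatMap (fun x => [x, x])).Perm lvls) := by
      rw [List.perm_iff_count]
      intro x
      rw [count_flat_pair]
      by_cases hx : x ∈ lvls
      · rw [List.count_eq_one_of_mem hcsnd ((hcsm x).mpr hx), hAll x hx]
      · rw [List.count_eq_zero.mpr hx, List.count_eq_zero.mpr (fun h => hx ((hcsm x).mp h))]
    have hpw : (cs.flatMap (fun x => [x, x])).Pairwise (· ≤ ·) :=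
      pairwise_le_flat_pair cs hcslt
    exact PySem.List.sorted_id_eq_of_perm_of_pairwise lvls _ hperm hpw

lemma len_flat_pair (ps : List Int) : (ps.flatMap (fun x => [x, x])).length = 2 * ps.length := by
  induction ps with
  | nil => simp
  | cons a t ih => simp [ih]; omega

lemma flat_pair_get (ps : List Int) (k : Nat) (hk : k < ps.length) :
    (ps.flatMap (fun x => [x, x]))[2 * k]? = some ps[k] ∧
    (ps.flatMap (fun x => [x, x]))[2 * k + 1]? = some ps[k] := by
  induction ps generalizing k with
  | nil => simp at hk
  | cons a t ih =>
    cases k with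
    | zero => simp
    | succ k' =>
      have h' := ih k' (by simpa using Nat.lt_of_succ_lt_succ hk)
      constructor
      · have : 2 * (k' + 1) = (2 * k') + 2 := by ring
        rw [this]; simpa using h'.1
      · have : 2 * (k' + 1) + 1 = (2 * k' + 1) + 2 := by ring
        rw [this]; simpa using h'.2

lemma pairs_decomp (m : Nat) (cl : List Int) (hl : cl.length = 2 * m)
    (hp : ∀ i : Nat, i < m → cl[2 * i]? = cl[2 * i + 1]?) :
    ∃ ps : List Int, ps.length = m ∧ cl = ps.flatMap (fun x => [x, x]) := by
  induction m generalizing cl with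
  | zero => exact ⟨[], rfl, by cases cl <;> simp_all⟩
  | succ m' ih =>
    match cl, hl with
    | a :: b :: rest, hl =>
      have hab : a = b := by have := hp 0 (Nat.succ_pos _); simpa using this
      have hrest : rest.length = 2 * m' := by simp at hl; omega
      have hp' : ∀ i : Nat, i < m' → rest[2 * i]? = rest[2 * i + 1]? := by
        intro i hi
        have := hp (i + 1) (by omega)
        have e1 : 2 * (i + 1) = (2 * i) + 2 := by ring
        rw [e1] at this
        simpa using this
      rcases ih rest hrest hp' with ⟨ps, hlen, hflat⟩
      exact ⟨a :: ps, by simp [hlen], by subst hab; simp [hflat]⟩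

lemma guard_loop_iff (lvls : List Int) :
    ((((PySem.List.sorted lvls (fun x => x) false).length : Int) =
        (((PySem.List.sorted (PySem.Set.ofList (PySem.List.sorted lvls (fun x => x) false)) (fun x => x) false).length : Int)) * 2) ∧
      ((PySem.List.pyRange 0 (PySem.Int.floordiv ((PySem.List.sorted lvls (fun x => x) false).length : Int) 2) 1).all
        (fun i => PySem.List.pyGetD (PySem.List.sorted lvls (fun x => x) false) (i * 2) 0 ==
          PySem.List.pyGetD (PySem.List.sorted lvls (fun x => x) false) (i * 2 + 1) 0)) = true)
    ↔ PySem.List.sorted lvls (fun x => x) false =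
        (PySem.List.sorted (PySem.Set.ofList (PySem.List.sorted lvls (fun x => x) false)) (fun x => x) false).flatMap
          (fun x => [x, x]) := by
  set cl := PySem.List.sorted lvls (fun x => x) false with hcl
  set cs := PySem.List.sorted (PySem.Set.ofList cl) (fun x => x) false with hcs
  have hcslt : cs.Pairwise (· < ·) := PySem.List.sorted_ofList_pairwise_lt cl
  have hcsnd : cs.Nodup := hcslt.imp (fun h => ne_of_lt h)
  constructor
  · rintro ⟨hlen, hloop⟩
    have hlenN : cl.length = 2 * cs.length := by omega
    have hfd : PySem.Int.floordiv (cl.length : Int) 2 = (cs.length : Int) := by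
      rw [PySem.Int.floordiv_eq_ediv_of_pos (by norm_num)]; omega
    rw [hfd] at hloop
    have hp : ∀ k : Nat, k < cs.length → cl[2 * k]? = cl[2 * k + 1]? := by
      intro k hk
      have hmem : ((k : Int)) ∈ PySem.List.pyRange 0 (cs.length : Int) 1 := by
        rw [PySem.List.mem_pyRange_one]; constructor <;> [positivity; exact_mod_cast hk]
      have := List.all_eq_true.mp hloop _ hmem
      have e1 : (k : Int) * 2 = ((2 * k : Nat) : Int) := by push_cast; ring
      have e2 : ((2 * k : Nat) : Int) + 1 = ((2 * k + 1 : Nat) : Int) := by push_cast; ring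
      rw [e1, e2, PySem.List.pyGetD_natCast, PySem.List.pyGetD_natCast, beq_iff_eq] at this
      have hb1 : 2 * k < cl.length := by omega
      have hb2 : 2 * k + 1 < cl.length := by omega
      rw [List.getD_eq_getElem?_getD, List.getD_eq_getElem?_getD,
        List.getElem?_eq_getElem hb1, List.getElem?_eq_getElem hb2] at this
      rw [List.getElem?_eq_getElem hb1, List.getElem?_eq_getElem hb2]
      simpa using this
    rcases pairs_decomp cs.length cl hlenN hp with ⟨ps, hplen, hflat⟩
    -- show ps = cs
    have hmemps : ∀ x, x ∈ ps ↔ x ∈ cl := by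
      intro x; rw [hflat, mem_flat_pair]
    have hmemcs : ∀ x, x ∈ cs ↔ x ∈ cl := by
      intro x; rw [hcs, PySem.List.mem_sorted, PySem.Set.mem_ofList]
    have hfs : ps.toFinset = cs.toFinset := by
      ext x; rw [List.mem_toFinset, List.mem_toFinset, hmemps, hmemcs]
    have hpsnd : ps.Nodup := by
      apply nodup_of_toFinset_card
      rw [hfs, List.toFinset_card_of_nodup hcsnd, hplen]
    have hclpw : cl.Pairwise (· ≤ ·) := by
      have := PySem.List.sorted_pairwise lvls (fun x => x)
      simpa using this
    have hpspw : ps.Pairwise (· ≤ ·) := by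
      refine List.Pairwise.sublist ?_ hclpw
      rw [hflat]; exact sublist_flat_pair ps
    have hpslt : ps.Pairwise (· < ·) :=
      (hpsnd.and hpspw).imp (fun ⟨hne, hle⟩ => lt_of_le_of_ne hle hne)
    have hperm : ps.Perm (PySem.Set.ofList cl) := by
      rw [List.perm_ext_iff_of_nodup hpsnd (PySem.Set.nodup_ofList cl)]
      intro x; rw [hmemps, PySem.Set.mem_ofList]
    have : cs = ps := PySem.List.sorted_eq_of_perm_of_pairwise_lt _ _ _ hperm hpslt
    rw [hflat, this]
  · intro hflat
    have hlenN : cl.length = 2 * cs.length := by rw [hflat, len_flat_pair]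
    have hlen : (cl.length : Int) = (cs.length : Int) * 2 := by omega
    refine ⟨hlen, ?_⟩
    have hfd : PySem.Int.floordiv (cl.length : Int) 2 = (cs.length : Int) := by
      rw [PySem.Int.floordiv_eq_ediv_of_pos (by norm_num)]; omega
    rw [hfd, List.all_eq_true]
    intro i hi
    rw [PySem.List.mem_pyRange_one] at hi
    obtain ⟨k, rfl⟩ : ∃ k : Nat, i = (k : Int) := ⟨i.toNat, (Int.toNat_of_nonneg hi.1).symm⟩
    have hk : k < cs.length := by exact_mod_cast hi.2
    have hg := flat_pair_get cs k hk
    have e1 : (k : Int) * 2 = ((2 * k : Nat) : Int) := by push_cast; ring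
    have e2 : ((2 * k : Nat) : Int) + 1 = ((2 * k + 1 : Nat) : Int) := by push_cast; ring
    rw [e1, e2, PySem.List.pyGetD_natCast, PySem.List.pyGetD_natCast, beq_iff_eq,
      List.getD_eq_getElem?_getD, List.getD_eq_getElem?_getD, hflat, hg.1, hg.2]

lemma pyGetD_zero_ne_nil (xs : List Int) (h : xs ≠ []) :
    PySem.List.pyGetD xs 0 0 = xs[0]'(List.length_pos_of_ne_nil h) := by
  have hl : 0 < xs.length := List.length_pos_of_ne_nil h
  simp [PySem.List.pyGetD, PySem.List.pyGet?, PySem.List.pyIdx?, hl]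

lemma pyGetD_neg_one_ne_nil (xs : List Int) (h : xs ≠ []) :
    PySem.List.pyGetD xs (-1) 0 = xs[xs.length - 1]'(by
      have := List.length_pos_of_ne_nil h; omega) := by
  have hl : 0 < xs.length := List.length_pos_of_ne_nil h
  have h1 : ¬ ((0:Int) ≤ -1) := by norm_num
  have h2 : (-(xs.length:Int) ≤ -1) := by omega
  have h3 : xs.length - (1:Int).toNat < xs.length := by omega
  simp only [PySem.List.pyGetD, PySem.List.pyGet?, PySem.List.pyIdx?, h1, if_false, h2, if_true]
  norm_num
  rw [List.getElem?_eq_getElem (by omega)]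
  rfl

lemma values_check (lvls : List Int) :
    (((PySem.Dict.counter lvls).values.any (fun c => c != 2)) = false) ↔ allTwo lvls := by
  rw [PySem.Dict.values_eq_map_keys _ (PySem.Dict.nodup_keys_counter lvls) 0]
  rw [PySem.Dict.keys_counter]
  rw [List.any_map, List.any_eq_false]
  constructor
  · intro h x hx
    have := h x ((PySem.Set.mem_ofList lvls x).mpr hx)
    simp only [Function.comp, PySem.Dict.getD_counter, bne_iff_ne, ne_eq, not_not] at this
    exact_mod_cast this
  · intro h x hx
    have hx' := (PySem.Set.mem_ofList lvls x).mp hx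
    simp only [Function.comp, PySem.Dict.getD_counter, bne_iff_ne, ne_eq, not_not]
    exact_mod_cast h x hx'


lemma max_min_spec (keys cs : List Int) (hpw : cs.Pairwise (· < ·))
    (hmem : ∀ x, x ∈ keys ↔ x ∈ cs) (hne : keys ≠ []) :
    PySem.List.max? keys (fun x => x) = some (PySem.List.pyGetD cs (-1) 0) ∧
    PySem.List.min? keys (fun x => x) = some (PySem.List.pyGetD cs 0 0) := by
  have hcsne : cs ≠ [] := by
    match keys, hne with
    | x :: t, _ =>
      intro h
      have : x ∈ cs := (hmem x).mp (by simp)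
      rw [h] at this; simp at this
  have hlpos : 0 < cs.length := List.length_pos_of_ne_nil hcsne
  have hmono : ∀ (i j : Nat) (hi : i < cs.length) (hj : j < cs.length), i ≤ j → cs[i] ≤ cs[j] := by
    intro i j hi hj hij
    rcases Nat.lt_or_ge i j with h | h
    · exact le_of_lt (List.pairwise_iff_getElem.mp hpw i j hi hj h)
    · have : i = j := by omega
      subst this; exact le_refl _
  rw [pyGetD_neg_one_ne_nil cs hcsne, pyGetD_zero_ne_nil cs hcsne]
  constructor
  · cases h : PySem.List.max? keys (fun x => x) with
    | none => exact absurd ((PySem.List.max?_eq_none_iff _ _).mp h) hne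
    | some mx =>
      congr 1
      have hmxcs : mx ∈ cs := (hmem mx).mp (PySem.List.max?_mem h)
      rcases List.mem_iff_getElem.mp hmxcs with ⟨j, hj, hjx⟩
      have h1 : mx ≤ cs[cs.length - 1]'(by omega) := by
        rw [← hjx]; exact hmono j (cs.length - 1) hj (by omega) (by omega)
      have h2 : cs[cs.length - 1]'(by omega) ≤ mx :=
        PySem.List.max?_isMax h _ ((hmem _).mpr (List.getElem_mem _))
      exact le_antisymm h1 h2
  · cases h : PySem.List.min? keys (fun x => x) with
    | none => exact absurd ((PySem.List.min?_eq_none_iff _ _).mp h) hne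
    | some mn =>
      congr 1
      have hmncs : mn ∈ cs := (hmem mn).mp (PySem.List.min?_mem h)
      rcases List.mem_iff_getElem.mp hmncs with ⟨j, hj, hjx⟩
      have h1 : cs[0]'hlpos ≤ mn := by
        rw [← hjx]; exact hmono 0 j hlpos hj (by omega)
      have h2 : mn ≤ cs[0]'hlpos :=
        PySem.List.min?_isMin h _ ((hmem _).mpr (List.getElem_mem _))
      exact le_antisymm h2 h1


theorem main_equiv (cards : List (List String)) (hpre : cards.all pvValidCard = true) :
    is_pair_chain cards = is_pair_chain_alt cards := by
  rcases mapM_levels cards hpre with ⟨lvls, hmap, hlen⟩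
  simp only [is_pair_chain, is_pair_chain_alt, hmap]
  have hcll : (PySem.List.sorted lvls (fun x => x) false).length = lvls.length :=
    PySem.List.length_sorted lvls (fun x => x) false
  by_cases h5 : (cards.length : Int) ≤ 5
  · rw [if_pos h5, if_neg]
    rintro ⟨h5', -⟩
    rw [hcll] at h5'
    omega
  · rw [if_neg h5]
    have h6 : 5 < lvls.length := by omega
    have hne : lvls ≠ [] := by intro h; rw [h] at h6; simp at h6
    have hcounter : List.foldl (fun d lv => d.insert lv (d.getD lv 0 + 1))
        (PySem.Dict.empty : PySem.Dict Int Int) lvls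
        = PySem.Dict.counter lvls := PySem.Dict.foldl_insert_getD_add_one_eq_counter lvls
    rw [hcounter]
    by_cases hAT : allTwo lvls
    · have hflat := (flat_iff_allTwo lvls).mpr hAT
      obtain ⟨hlen2, hloop⟩ := (guard_loop_iff lvls).mpr hflat
      rw [if_pos ⟨by rw [hcll]; omega, hlen2⟩, if_pos hloop]
      set cl := PySem.List.sorted lvls (fun x => x) false with hclDef
      set cs := PySem.List.sorted (PySem.Set.ofList cl) (fun x => x) false with hcsDef
      have hanyf : ((PySem.Dict.counter lvls).values.any (fun c => c != 2)) = false :=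
        (values_check lvls).mpr hAT
      rw [hanyf, if_neg (show ¬(false = true) by decide), PySem.Dict.keys_counter]
      have hcslt : cs.Pairwise (· < ·) := PySem.List.sorted_ofList_pairwise_lt cl
      have hclp : cl.Perm lvls := PySem.List.sorted_perm lvls (fun x => x) false
      have hmem : ∀ x, x ∈ PySem.Set.ofList lvls ↔ x ∈ cs := by
        intro x
        rw [PySem.Set.mem_ofList, hcsDef, PySem.List.mem_sorted, PySem.Set.mem_ofList]
        exact hclp.mem_iff.symm
      have hkne : PySem.Set.ofList lvls ≠ [] := by
        match lvls, hne with
        | x :: t, _ =>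
          intro h
          have : x ∈ PySem.Set.ofList (x :: t) := (PySem.Set.mem_ofList _ _).mpr (by simp)
          rw [h] at this; simp at this
      obtain ⟨hmx, hmn⟩ := max_min_spec (PySem.Set.ofList lvls) cs hcslt hmem hkne
      rw [hmx, hmn]
      have hsize : ((PySem.Dict.counter lvls).size : Int) = (cs.length : Int) := by
        have h1 : (PySem.Dict.counter lvls).size = (PySem.Dict.counter lvls).keys.length := by
          simp [PySem.Dict.keys, PySem.Dict.size]
        have hperm : (PySem.Set.ofList lvls).Perm cs :=
          (List.perm_ext_iff_of_nodup (PySem.Set.nodup_ofList lvls)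
            (hcslt.imp (fun h => ne_of_lt h))).mpr hmem
        rw [h1, PySem.Dict.keys_counter, hperm.length_eq]
      by_cases hP : (cs.length : Int) =
          PySem.List.pyGetD cs (-1) 0 - PySem.List.pyGetD cs 0 0 + 1
      · rw [if_pos hP]
        symm
        rw [decide_eq_true_iff]
        omega
      · rw [if_neg hP]
        symm
        rw [decide_eq_false_iff_not]
        omega
    · have hanyt : ((PySem.Dict.counter lvls).values.any (fun c => c != 2)) = true := by
        cases h : ((PySem.Dict.counter lvls).values.any (fun c => c != 2)) with
        | false => exact absurd ((values_check lvls).mp h) hAT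
        | true => rfl
      rw [hanyt, if_pos rfl]
      split
      · split
        · rename_i hg hloop
          exact absurd ((flat_iff_allTwo lvls).mp ((guard_loop_iff lvls).mp ⟨hg.2, hloop⟩)) hAT
        · rfl
      · rfl

-- ===== VERDICT (by name: the statement is the Claim_ definition above) =====
theorem is_pair_chain_spec : Claim_equal_is_pair_chain := by
  intro cards _hdom hpre
  unfold Spec_is_pair_chain
  exact main_equiv cards hpre
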